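-- pv_equiv track=rewrite | github.com/mohammadfaiizan/ProjectI | DSA/Problem/Trie/01_Trie_Fundamentals_Implementation/1065_Index_Pairs_of_a_String.py | indexPairs4
-- ===== SOURCE A (Python) =====
-- from typing import List, Tuple
--
-- def indexPairs4(text: str, words: List[str]) -> List[List[int]]:
--     """
--     Approach 4: KMP-based Multi-pattern Matching
--
--     Use KMP algorithm for each word pattern.
--
--     Time: O(T*W + sum of word lengths)
--     Space: O(max word length)
--     """
--     result = []
--
--     def kmp_search(text: str, pattern: str) -> List[int]:
--         """KMP algorithm to find all occurrences"""
--         if not pattern: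
--             return []
--
--         # Build LPS array
--         m = len(pattern)
--         lps = [0] * m
--         length = 0
--         i = 1
--
--         while i < m:
--             if pattern[i] == pattern[length]:
--                 length += 1
--                 lps[i] = length
--                 i += 1
--             else:
--                 if length != 0:
--                     length = lps[length - 1]
--                 else:
--                     lps[i] = 0
--                     i += 1
--
--         # Search for pattern
--         matches = []
--         i = j = 0
--         n = len(text)
--
--         while i < n:
--             if pattern[j] == text[i]:
--                 i += 1
--                 j += 1
--
--             if j == m:
--                 matches.append(i - j)
--                 j = lps[j - 1]
--             elif i < n and pattern[j] != text[i]: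
--                 if j != 0:
--                     j = lps[j - 1]
--                 else:
--                     i += 1
--
--         return matches
--
--     # Search for each word
--     for word in words:
--         start_positions = kmp_search(text, word)
--         for start in start_positions:
--             result.append([start, start + len(word) - 1])
--
--     return sorted(result)
-- ===== SOURCE B (Python) =====
-- def indexPairs4(text, words):
--     n = len(text)
--     ws = sorted(words, key=len)
--     return [[i, i + len(w) - 1]
--             for i in range(n)
--             for w in ws
--             if w and text[i:i + len(w)] == w]
-- ===== Notes on version B (the rewrite author's own statement) =====
-- stated objective: alternative
-- what changed: Replaces A's per-word KMP scans (LPS table build plus failure-link search loop) and final global sort with a single position-major comprehension over length-sorted words using direct slice comparison, which emits the pairs already in sorted order with no result sort.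
import Mathlib
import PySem

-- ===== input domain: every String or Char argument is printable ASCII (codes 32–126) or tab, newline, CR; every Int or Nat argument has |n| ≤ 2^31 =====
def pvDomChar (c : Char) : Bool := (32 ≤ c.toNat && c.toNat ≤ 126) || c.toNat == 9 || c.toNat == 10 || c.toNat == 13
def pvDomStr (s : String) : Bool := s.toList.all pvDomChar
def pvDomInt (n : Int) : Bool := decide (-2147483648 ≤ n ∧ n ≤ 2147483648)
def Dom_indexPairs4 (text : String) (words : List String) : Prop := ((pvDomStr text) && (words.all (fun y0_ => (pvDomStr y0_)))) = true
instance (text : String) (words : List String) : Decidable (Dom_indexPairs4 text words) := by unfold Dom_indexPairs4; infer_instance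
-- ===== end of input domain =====

-- B replaces A's per-word KMP scans plus a final global sort by a single position-major
-- comprehension over length-sorted words with direct slice comparison (no result sort); same value.

-- ===== PORT A =====
-- the inner `while i < m` loop of kmp_search's LPS construction (fuel only makes the loop total; proved sufficient below)
def pvLpsLoop (p : List Char) (fuel : Nat) (lps : List Nat) (len i : Nat) : List Nat :=
  match fuel with
  | 0 => lps
  | fuel+1 =>
    if i < p.length then
      if p.getD i ' ' = p.getD len ' ' then
        pvLpsLoop p fuel (lps.set i (len+1)) (len+1) (i+1)
      else if len ≠ 0 then
        pvLpsLoop p fuel lps (lps.getD (len-1) 0) i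
      else
        pvLpsLoop p fuel (lps.set i 0) len (i+1)
    else lps

-- the `while i < n` search loop of kmp_search
def pvKmpLoop (t p : List Char) (lps : List Nat) (fuel : Nat) (i j : Nat) (ms : List Nat) : List Nat :=
  match fuel with
  | 0 => ms
  | fuel+1 =>
    if i < t.length then
      let ij := if p.getD j ' ' = t.getD i ' ' then (i+1, j+1) else (i, j)
      if ij.2 = p.length then
        pvKmpLoop t p lps fuel ij.1 (lps.getD (ij.2 - 1) 0) (ms ++ [ij.1 - ij.2])
      else if ij.1 < t.length ∧ p.getD ij.2 ' ' ≠ t.getD ij.1 ' ' then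
        if ij.2 ≠ 0 then pvKmpLoop t p lps fuel ij.1 (lps.getD (ij.2 - 1) 0) ms
        else pvKmpLoop t p lps fuel (ij.1 + 1) ij.2 ms
      else pvKmpLoop t p lps fuel ij.1 ij.2 ms
    else ms

def pvKmpSearch (t p : List Char) : List Nat :=
  if p = [] then []
  else
    let lps := pvLpsLoop p (2 * p.length) (List.replicate p.length 0) 0 1
    pvKmpLoop t p lps (2 * t.length + 1) 0 0 []

def indexPairs4 (text : String) (words : List String) : List (List Int) :=
  let result := words.foldl (fun acc w =>
    (pvKmpSearch text.toList w.toList).foldl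
      (fun acc2 (s : Nat) => acc2 ++ [[(s : Int), (s : Int) + PySem.Str.len w - 1]]) acc) []
  PySem.List.sorted result (fun x => x) false

-- ===== PORT B =====
def indexPairs4_alt (text : String) (words : List String) : List (List Int) :=
  let n := PySem.Str.len text
  let ws := PySem.List.sorted words (fun w => PySem.Str.len w) false
  (PySem.List.pyRange 0 n 1).flatMap (fun i =>
    (ws.filter (fun w => w ≠ "" && (PySem.Str.slice text (some i) (some (i + PySem.Str.len w)) == w))).map
      (fun w => [i, i + PySem.Str.len w - 1]))

-- ===== PRECONDITION & SPEC =====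
def Spec_indexPairs4 (text : String) (words : List String) (out : List (List Int)) : Prop := out = indexPairs4_alt text words
instance (text : String) (words : List String) (out : List (List Int)) : Decidable (Spec_indexPairs4 text words out) := by unfold Spec_indexPairs4; infer_instance

-- ===== CLAIM (what is proved, stated in full; the proofs are below) =====
def Claim_equal_indexPairs4 : Prop := ∀ (text : String) (words : List String), Dom_indexPairs4 text words → Spec_indexPairs4 text words (indexPairs4 text words)

-- ===== LEMMAS AND PROOFS =====

-- borders of a string: take k is also a suffix
def pvBrd (s : List Char) (k : Nat) : Prop := k < s.length ∧ s.take k <:+ s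

-- longest proper border
def pvMaxB (s : List Char) : Nat := Nat.findGreatest (fun k => s.take k <:+ s) (s.length - 1)

-- the true LPS table
def pvLpsTab (p : List Char) : List Nat := (List.range p.length).map (fun i => pvMaxB (p.take (i+1)))

def pvMatchAt (t p : List Char) (s : Nat) : Bool := decide ((t.drop s).take p.length = p)

def pvOcc (t p : List Char) : List Nat := (List.range t.length).filter (pvMatchAt t p)

def pvOccUpTo (t p : List Char) (i : Nat) : List Nat :=
  (List.range t.length).filter (fun s => decide (s + p.length ≤ i) && pvMatchAt t p s)

def pvG (t : List Char) (i : Nat) (w : String) : Option (List Int) :=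
  if w.toList ≠ [] ∧ (t.drop i).take w.toList.length = w.toList then
    some [(i : Int), (i : Int) + (w.toList.length : Int) - 1] else none

def pvB (text : String) (words : List String) : List (List Int) :=
  (List.range text.toList.length).flatMap (fun i =>
    (PySem.List.sorted words (fun w => PySem.Str.len w) false).filterMap (pvG text.toList i))

theorem suffix_snoc_iff {α : Type} (xs ys : List α) (a b : α) :
    xs ++ [a] <:+ ys ++ [b] ↔ xs <:+ ys ∧ a = b := by
  rw [← List.reverse_prefix]
  simp [List.cons_prefix_cons, List.reverse_prefix, and_comm]

theorem pvBrd_zero {s : List Char} (h : s ≠ []) : pvBrd s 0 :=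
  ⟨List.length_pos_of_ne_nil h, by rw [List.take_zero]; exact List.nil_suffix⟩

theorem pvBrd_le_maxB {s : List Char} {k : Nat} (h : pvBrd s k) : k ≤ pvMaxB s :=
  Nat.le_findGreatest (by have := h.1; omega) h.2

theorem pvMaxB_brd {s : List Char} (h : s ≠ []) : pvBrd s (pvMaxB s) := by
  refine ⟨?_, Nat.findGreatest_spec (P := fun k => s.take k <:+ s) (m := 0) (Nat.zero_le _) (by simp only [List.take_zero]; exact List.nil_suffix)⟩
  have h1 := Nat.findGreatest_le (P := fun k => s.take k <:+ s) (s.length - 1)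
  have h2 : 0 < s.length := List.length_pos_of_ne_nil h
  unfold pvMaxB; omega

theorem pvMaxB_lt {s : List Char} (h : s ≠ []) : pvMaxB s < s.length := (pvMaxB_brd h).1

theorem pvMaxB_short {s : List Char} (h : s.length ≤ 1) : pvMaxB s = 0 := by
  unfold pvMaxB
  have : s.length - 1 = 0 := by omega
  rw [this, Nat.findGreatest_zero]

theorem take_snoc {p : List Char} {i : Nat} (h : i < p.length) :
    p.take (i+1) = p.take i ++ [p.getD i ' '] := by
  rw [List.take_add_one]
  simp [List.getElem?_eq_getElem h, List.getD_eq_getElem?_getD]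

theorem pvBrd_lt_of_take {p : List Char} {i k : Nat} (hb : pvBrd (p.take i) k) : k < i := by
  have := hb.1; simp [List.length_take] at this; omega

theorem brd_ext_intro {p : List Char} {i k : Nat} (hi : i < p.length)
    (hb : pvBrd (p.take i) k) (hc : p.getD k ' ' = p.getD i ' ') :
    pvBrd (p.take (i+1)) (k+1) := by
  have hk : k < i := pvBrd_lt_of_take hb
  constructor
  · simp [List.length_take]; omega
  · rw [List.take_take, min_eq_left (by omega : k+1 ≤ i+1), take_snoc (by omega : k < p.length),
        take_snoc hi, suffix_snoc_iff]
    refine ⟨?_, hc⟩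
    have h2 := hb.2
    rw [List.take_take, min_eq_left (le_of_lt hk)] at h2
    exact h2

theorem brd_ext_elim {p : List Char} {i k : Nat} (hi : i < p.length)
    (hb : pvBrd (p.take (i+1)) (k+1)) :
    pvBrd (p.take i) k ∧ p.getD k ' ' = p.getD i ' ' := by
  have h1 := hb.1
  rw [List.length_take] at h1
  have hk : k < i := by omega
  have h2 := hb.2
  rw [List.take_take, min_eq_left (by omega : k+1 ≤ i+1), take_snoc (by omega : k < p.length),
      take_snoc hi, suffix_snoc_iff] at h2
  refine ⟨⟨by rw [List.length_take]; omega, ?_⟩, h2.2⟩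
  rw [List.take_take, min_eq_left (le_of_lt hk)]
  exact h2.1

theorem brd_chain {s : List Char} {k k' : Nat} (h : pvBrd s k) (h' : pvBrd s k') (hlt : k' < k) :
    pvBrd (s.take k) k' := by
  have hk := h.1
  have hk' := h'.1
  refine ⟨by rw [List.length_take]; omega, ?_⟩
  rw [List.take_take, min_eq_left (le_of_lt hlt)]
  exact List.suffix_of_suffix_length_le h'.2 h.2 (by rw [List.length_take, List.length_take]; omega)

theorem brd_trans {s : List Char} {k j : Nat} (h : pvBrd s k) (h' : pvBrd (s.take k) j) :
    pvBrd s j := by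
  have hj : j < k := pvBrd_lt_of_take h'
  refine ⟨by have := h.1; omega, ?_⟩
  have h2 := h'.2
  rw [List.take_take, min_eq_left (le_of_lt hj)] at h2
  exact h2.trans h.2

theorem getD_set_ne {l : List Nat} {i j : Nat} (v d : Nat) (h : i ≠ j) :
    (l.set i v).getD j d = l.getD j d := by
  simp [List.getD_eq_getElem?_getD, List.getElem?_set_ne h]

theorem getD_set_self {l : List Nat} {i : Nat} (v d : Nat) (h : i < l.length) :
    (l.set i v).getD i d = v := by
  simp [List.getD_eq_getElem?_getD, h]

theorem take_ne_nil_of_lt {p : List Char} {i : Nat} (h : i < p.length) : p.take (i+1) ≠ [] := by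
  have hl : (p.take (i+1)).length = i+1 := by rw [List.length_take]; omega
  intro hcon
  rw [hcon] at hl
  simp at hl

theorem pvLpsLoop_go (p : List Char) : ∀ (fuel : Nat) (lps : List Nat) (len i : Nat),
    1 ≤ i → i ≤ p.length → lps.length = p.length →
    (∀ j, j < i → lps.getD j 0 = pvMaxB (p.take (j+1))) →
    pvBrd (p.take i) len →
    (i < p.length → ∀ b, pvBrd (p.take (i+1)) b → b ≤ len + 1) →
    2*(p.length - i) + len + 1 ≤ fuel →
    pvLpsLoop p fuel lps len i = pvLpsTab p := by
  intro fuel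
  induction fuel with
  | zero => intro lps len i _ _ _ _ _ _ hf; omega
  | succ fuel ih =>
    intro lps len i hi1 him hlen h2 h4 h5 hf
    simp only [pvLpsLoop]
    by_cases hi : i < p.length
    · rw [if_pos hi]
      by_cases hc : p.getD i ' ' = p.getD len ' '
      · rw [if_pos hc]
        have hlt : len < i := pvBrd_lt_of_take h4
        have hbrd : pvBrd (p.take (i+1)) (len+1) := brd_ext_intro hi h4 hc.symm
        have hne : p.take (i+1) ≠ [] := take_ne_nil_of_lt hi
        have hmax : pvMaxB (p.take (i+1)) = len + 1 :=
          le_antisymm (h5 hi _ (pvMaxB_brd hne)) (pvBrd_le_maxB hbrd)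
        apply ih
        · omega
        · omega
        · rw [List.length_set]; exact hlen
        · intro j hj
          rcases Nat.lt_or_ge j i with hji | hji
          · rw [getD_set_ne _ _ (by omega)]; exact h2 j hji
          · have hji' : j = i := by omega
            subst hji'
            rw [getD_set_self _ _ (by omega), hmax]
        · exact hbrd
        · intro hii b hb
          rcases b with _ | c
          · omega
          · obtain ⟨hcb, _⟩ := brd_ext_elim hii hb
            have := pvBrd_le_maxB hcb
            omega
        · omega
      · rw [if_neg hc]
        by_cases hl0 : len ≠ 0
        · rw [if_pos hl0]
          have hlt : len < i := pvBrd_lt_of_take h4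
          have hlen1 : (p.take len).length = len := by rw [List.length_take]; omega
          have hlnil : p.take len ≠ [] := by
            intro hcon; rw [hcon] at hlen1; simp at hlen1; omega
          have hval : lps.getD (len-1) 0 = pvMaxB (p.take len) := by
            have h := h2 (len-1) (by omega)
            rwa [Nat.sub_add_cancel (by omega)] at h
          have hmb := pvMaxB_brd hlnil
          have hmlt : pvMaxB (p.take len) < len := by
            have := pvMaxB_lt hlnil; rwa [hlen1] at this
          apply ih
          · omega
          · omega
          · exact hlen
          · exact h2
          · rw [hval]
            refine brd_trans h4 ?_
            rw [List.take_take, min_eq_left (le_of_lt hlt)]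
            exact hmb
          · intro hii b hb
            rcases b with _ | c
            · omega
            · obtain ⟨hcb, hceq⟩ := brd_ext_elim hii hb
              have hcle : c ≤ len := by have := h5 hii (c+1) hb; omega
              rcases eq_or_lt_of_le hcle with hceq2 | hclt
              · exact absurd (by rw [← hceq2]; exact hceq.symm) hc
              · have hbc : pvBrd (p.take len) c := by
                  have h := brd_chain h4 hcb hclt
                  rwa [List.take_take, min_eq_left (le_of_lt hlt)] at h
                have := pvBrd_le_maxB hbc
                rw [hval]
                omega
          · rw [hval]; omega
        · rw [if_neg hl0]
          rw [not_not] at hl0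
          subst hl0
          have hne : p.take (i+1) ≠ [] := take_ne_nil_of_lt hi
          have hmax0 : pvMaxB (p.take (i+1)) = 0 := by
            rcases hmb : pvMaxB (p.take (i+1)) with _ | c
            · rfl
            · exfalso
              have hbrd := pvMaxB_brd hne
              rw [hmb] at hbrd
              obtain ⟨hcb, hceq⟩ := brd_ext_elim hi hbrd
              have hb1 : c + 1 ≤ 0 + 1 := h5 hi (c+1) (by rw [← hmb]; exact pvMaxB_brd hne)
              have hc0 : c = 0 := by omega
              subst hc0
              exact hc hceq.symm
          apply ih
          · omega
          · omega
          · rw [List.length_set]; exact hlen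
          · intro j hj
            rcases Nat.lt_or_ge j i with hji | hji
            · rw [getD_set_ne _ _ (by omega)]; exact h2 j hji
            · have hji' : j = i := by omega
              subst hji'
              rw [getD_set_self _ _ (by omega), hmax0]
          · exact pvBrd_zero hne
          · intro hii b hb
            rcases b with _ | c
            · omega
            · obtain ⟨hcb, _⟩ := brd_ext_elim hii hb
              have := pvBrd_le_maxB hcb
              omega
          · omega
    · rw [if_neg hi]
      have him' : i = p.length := by omega
      apply List.ext_getElem
      · rw [hlen]; unfold pvLpsTab; simp
      · intro j hj1 hj2
        have hjm : j < p.length := by rw [hlen] at hj1; exact hj1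
        have h := h2 j (by omega)
        rw [List.getD_eq_getElem _ _ hj1] at h
        rw [h]
        unfold pvLpsTab
        rw [List.getElem_map, List.getElem_range]

theorem map_filter_eq_filterMap {α β : Type} (l : List α) (pb : α → Bool) (f : α → β) :
    (l.filter pb).map f = l.filterMap (fun a => if pb a then some (f a) else none) := by
  induction l with
  | nil => rfl
  | cons a l ih => by_cases h : pb a <;> simp [h, ih]

theorem filterMap_cons_toList {α β : Type} (a : α) (l : List α) (f : α → Option β) :
    (a :: l).filterMap f = (f a).toList ++ l.filterMap f := by
  cases h : f a <;> simp [h]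

theorem flatMap_toList_eq_filterMap {β γ : Type} (ys : List β) (g : β → Option γ) :
    (ys.flatMap (fun b => (g b).toList)) = ys.filterMap g := by
  induction ys with
  | nil => rfl
  | cons b ys ih => cases h : g b <;> simp [h, ih]

theorem perm_append_swap {γ : Type} (u v x y : List γ) :
    ((u ++ v) ++ (x ++ y)).Perm ((u ++ x) ++ (v ++ y)) := by
  have h1 : (v ++ (x ++ y)).Perm (x ++ (v ++ y)) := by
    rw [← List.append_assoc, ← List.append_assoc]
    exact List.perm_append_comm.append_right y
  have h2 := h1.append_left u
  simpa [List.append_assoc] using h2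

theorem flatMap_append_perm {β γ : Type} (ys : List β) (f h : β → List γ) :
    (ys.flatMap (fun b => f b ++ h b)).Perm (ys.flatMap f ++ ys.flatMap h) := by
  induction ys with
  | nil => simp
  | cons b ys ih =>
    simp only [List.flatMap_cons]
    exact (ih.append_left (f b ++ h b)).trans (perm_append_swap _ _ _ _)

theorem swap_perm {α β γ : Type} (xs : List α) (ys : List β) (g : α → β → Option γ) :
    (xs.flatMap fun a => ys.filterMap fun b => g a b).Perm
      (ys.flatMap fun b => xs.filterMap fun a => g a b) := by
  induction xs with
  | nil => simp
  | cons a xs ih =>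
    simp only [List.flatMap_cons]
    have h1 : (ys.flatMap fun b => (a :: xs).filterMap fun a => g a b)
        = ys.flatMap (fun b => (g a b).toList ++ xs.filterMap fun a => g a b) := by
      simp only [filterMap_cons_toList]
    rw [h1]
    refine List.Perm.trans ?_ (flatMap_append_perm ys _ _).symm
    rw [flatMap_toList_eq_filterMap]
    exact ih.append_left _

theorem pairwise_flatMap_of {α β : Type} (R : β → β → Prop) (l : List α) (f : α → List β)
    (h1 : ∀ a ∈ l, (f a).Pairwise R)
    (h2 : l.Pairwise (fun a a' => ∀ x ∈ f a, ∀ y ∈ f a', R x y)) :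
    (l.flatMap f).Pairwise R := by
  induction l with
  | nil => simp
  | cons a l ih =>
    simp only [List.flatMap_cons, List.pairwise_append]
    refine ⟨h1 a (by simp), ih (fun a ha => h1 a (by simp [ha])) (List.Pairwise.of_cons h2), ?_⟩
    intro x hx y hy
    rw [List.mem_flatMap] at hy
    obtain ⟨b, hb, hyb⟩ := hy
    exact (List.rel_of_pairwise_cons h2 hb) x hx y hyb

theorem pair_le_pair_left (a b c d : Int) (h : a < c) : ([a,b] : List Int) ≤ [c,d] :=
  le_of_lt (List.Lex.rel h)

theorem pair_le_pair_right (a b d : Int) (h : b ≤ d) : ([a,b] : List Int) ≤ [a,d] := by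
  rcases lt_or_eq_of_le h with h' | h'
  · exact le_of_lt (List.Lex.cons (List.Lex.rel h'))
  · subst h'; exact le_refl _

theorem pvLps_eq' (p : List Char) (hp : p ≠ []) :
    pvLpsLoop p (2*p.length) (List.replicate p.length 0) 0 1 = pvLpsTab p := by
  have hm : 0 < p.length := List.length_pos_of_ne_nil hp
  apply pvLpsLoop_go p
  · omega
  · omega
  · simp
  · intro j hj
    have hj0 : j = 0 := by omega
    subst hj0
    rw [pvMaxB_short (by rw [List.length_take]; omega)]
    simp [List.getD_eq_getElem?_getD]
  · exact pvBrd_zero (take_ne_nil_of_lt (i := 0) hm)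
  · intro h1 b hb
    have := hb.1
    rw [List.length_take] at this
    omega
  · omega

theorem match_iff_suffix' {t p : List Char} {i : Nat} (hi : i ≤ t.length) (hm : p.length ≤ i) :
    pvMatchAt t p (i - p.length) = true ↔ p <:+ t.take i := by
  unfold pvMatchAt
  rw [decide_eq_true_iff, List.suffix_iff_eq_drop]
  have h1 : (t.take i).length = i := by rw [List.length_take]; omega
  have h2 : i - (i - p.length) = p.length := by omega
  rw [h1, List.drop_take, h2]
  exact ⟨fun h => h.symm, fun h => h.symm⟩

theorem matchAt_le' {t p : List Char} {s : Nat} (hp : p ≠ []) (h : pvMatchAt t p s = true) :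
    s + p.length ≤ t.length := by
  unfold pvMatchAt at h
  rw [decide_eq_true_iff] at h
  have hl := congrArg List.length h
  rw [List.length_take, List.length_drop] at hl
  have hm : 0 < p.length := List.length_pos_of_ne_nil hp
  omega

theorem occUpTo_zero' {t p : List Char} (hp : p ≠ []) : pvOccUpTo t p 0 = [] := by
  have hm : 0 < p.length := List.length_pos_of_ne_nil hp
  unfold pvOccUpTo
  rw [List.filter_eq_nil_iff]
  intro s _
  simp only [Bool.and_eq_true, decide_eq_true_iff]
  intro hcon
  omega

theorem occUpTo_final' {t p : List Char} (hp : p ≠ []) : pvOccUpTo t p t.length = pvOcc t p := by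
  unfold pvOccUpTo pvOcc
  apply List.filter_congr
  intro s _
  cases hM : pvMatchAt t p s
  · simp
  · simp [matchAt_le' hp hM]

theorem filter_range_snoc' (a : Nat) (f f' : Nat → Bool)
    (hlt : ∀ x, x < a → f' x = f x) (hgt' : ∀ x, a < x → f' x = false)
    (hgt : ∀ x, a < x → f x = false) (hfa : f a = false) (hfa' : f' a = true) :
    ∀ (n : Nat), a < n →
    (List.range n).filter f' = (List.range n).filter f ++ [a] := by
  intro n
  induction n with
  | zero => omega
  | succ n ih =>
    intro han
    rcases Nat.lt_or_ge a n with h | h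
    · rw [List.range_succ, List.filter_append, List.filter_append, ih h]
      simp [hgt' n h, hgt n h]
    · have ha : a = n := by omega
      subst ha
      rw [List.range_succ, List.filter_append, List.filter_append]
      have hcong : (List.range a).filter f' = (List.range a).filter f :=
        List.filter_congr (fun x hx => hlt x (List.mem_range.mp hx))
      simp [hfa, hfa', hcong]

theorem occUpTo_succ_eq' {t p : List Char} {i : Nat}
    (h : ¬ (p.length ≤ i+1 ∧ pvMatchAt t p (i+1-p.length) = true)) :
    pvOccUpTo t p (i+1) = pvOccUpTo t p i := by
  unfold pvOccUpTo
  apply List.filter_congr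
  intro s _
  by_cases hsi : s + p.length = i + 1
  · have hs : s = i + 1 - p.length := by omega
    have hM : pvMatchAt t p (i+1-p.length) = false := by
      rcases Bool.eq_false_or_eq_true (pvMatchAt t p (i+1-p.length)) with hT | hF
      · exact absurd ⟨by omega, hT⟩ h
      · exact hF
    rw [hs] at *
    simp [hM]
  · have : (decide (s + p.length ≤ i + 1)) = (decide (s + p.length ≤ i)) := by
      rcases Nat.lt_or_ge (s + p.length) (i+1) with hl | hl
      · simp; omega
      · have h1 : ¬ (s + p.length ≤ i + 1) := by omega
        have h2 : ¬ (s + p.length ≤ i) := by omega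
        simp [h1, h2]
    rw [this]

theorem occUpTo_succ_snoc' {t p : List Char} {i : Nat} (hp : p ≠ []) (hm : p.length ≤ i+1)
    (hM : pvMatchAt t p (i+1-p.length) = true) :
    pvOccUpTo t p (i+1) = pvOccUpTo t p i ++ [i+1-p.length] := by
  have hmpos : 0 < p.length := List.length_pos_of_ne_nil hp
  have hn : i + 1 - p.length < t.length := by
    have := matchAt_le' hp hM
    omega
  unfold pvOccUpTo
  apply filter_range_snoc' (i+1-p.length) _ _ _ _ _ _ _ _ hn
  · intro x hx
    have h1 : x + p.length ≤ i := by omega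
    simp [h1, Nat.le_succ_of_le h1]
  · intro x hx
    have h1 : ¬ (x + p.length ≤ i + 1) := by omega
    simp [h1]
  · intro x hx
    have h1 : ¬ (x + p.length ≤ i) := by omega
    simp [h1]
  · have h1 : ¬ (i+1-p.length + p.length ≤ i) := by omega
    simp [h1]
  · have h1 : i+1-p.length + p.length ≤ i+1 := by omega
    simp [h1, hM]

theorem pvKmpLoop_go' (t p : List Char) (hp : p ≠ []) (lps : List Nat)
    (hl : ∀ k, k < p.length → lps.getD k 0 = pvMaxB (p.take (k+1))) :
    ∀ (fuel : Nat) (i j : Nat) (ms : List Nat),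
    i ≤ t.length → j < p.length →
    p.take j <:+ t.take i →
    (i < t.length → ∀ k, k ≤ p.length → p.take k <:+ t.take i →
        k ≤ j ∨ k = p.length ∨ p.getD k ' ' ≠ t.getD i ' ') →
    ms = pvOccUpTo t p i →
    2*(t.length - i) + j + 1 ≤ fuel →
    pvKmpLoop t p lps fuel i j ms = pvOcc t p := by
  intro fuel
  induction fuel with
  | zero => intro i j ms _ _ _ _ _ hf; omega
  | succ fuel ih =>
    intro i j ms hin hjm hpart hg2 hms hf
    by_cases hi : i < t.length
    · have hj_le_i : j ≤ i := by
        have h := List.IsSuffix.length_le hpart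
        rw [List.length_take, List.length_take] at h
        omega
      by_cases hc : p.getD j ' ' = t.getD i ' '
      · -- characters match: i, j advance
        have hpart' : p.take (j+1) <:+ t.take (i+1) := by
          rw [take_snoc hjm, take_snoc hi, suffix_snoc_iff]
          exact ⟨hpart, hc⟩
        have key : ∀ k, k ≤ p.length → p.take k <:+ t.take (i+1) → k ≤ j+1 := by
          intro k hk hs
          rcases k with _ | c
          · omega
          · have hcm : c < p.length := by omega
            rw [take_snoc hcm, take_snoc hi, suffix_snoc_iff] at hs
            rcases hg2 hi c (by omega) hs.1 with h | h | h
            · omega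
            · omega
            · exact absurd hs.2 h
        by_cases hjm1 : j + 1 = p.length
        · -- full match: emit
          simp only [pvKmpLoop, if_pos hi, if_pos hc, if_pos hjm1]
          have hfull : p <:+ t.take (i+1) := by
            have h := hpart'
            rw [hjm1, List.take_length] at h
            exact h
          have hmle : p.length ≤ i+1 := by omega
          have hM : pvMatchAt t p (i+1-p.length) = true :=
            (match_iff_suffix' (by omega) hmle).mpr hfull
          have hval : lps.getD (j+1-1) 0 = pvMaxB p := by
            have h := hl (p.length - 1) (by omega)
            rw [Nat.sub_add_cancel (by omega), List.take_length] at h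
            have he : j + 1 - 1 = p.length - 1 := by omega
            rw [he, h]
          rw [hval]
          apply ih
          · omega
          · exact pvMaxB_lt hp
          · exact (pvMaxB_brd hp).2.trans hfull
          · intro hii k hk hs
            rcases Nat.eq_or_lt_of_le hk with he | hlt
            · right; left; exact he
            · left
              refine pvBrd_le_maxB (s := p) ⟨hlt, ?_⟩
              exact List.suffix_of_suffix_length_le hs hfull
                (by rw [List.length_take]; omega)
          · rw [hms, occUpTo_succ_snoc' hp hmle hM]
            congr 2
            omega
          · have := pvMaxB_lt hp
            omega
        · -- no emit this round
          have hjm2 : j + 1 < p.length := by omega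
          have hnomatch : ¬ (p.length ≤ i+1 ∧ pvMatchAt t p (i+1-p.length) = true) := by
            rintro ⟨hm1, hM⟩
            have hfull := (match_iff_suffix' (by omega) hm1).mp hM
            have := key p.length (le_refl _) (by rw [List.take_length]; exact hfull)
            omega
          have hms' : ms = pvOccUpTo t p (i+1) := by
            rw [occUpTo_succ_eq' hnomatch]; exact hms
          by_cases helif : i+1 < t.length ∧ p.getD (j+1) ' ' ≠ t.getD (i+1) ' '
          · simp only [pvKmpLoop, if_pos hi, if_pos hc, if_neg hjm1, if_pos helif,
              if_pos (Nat.succ_ne_zero j)]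
            have hval : lps.getD (j+1-1) 0 = pvMaxB (p.take (j+1)) := by
              have h := hl j hjm
              simpa using h
            rw [hval]
            have hlen_tj : (p.take (j+1)).length = j+1 := by rw [List.length_take]; omega
            have hne : p.take (j+1) ≠ [] := take_ne_nil_of_lt hjm
            have hmb := pvMaxB_brd hne
            have hjv : pvMaxB (p.take (j+1)) < j+1 := by
              have := pvMaxB_lt hne; rwa [hlen_tj] at this
            apply ih
            · omega
            · omega
            · have h2 := hmb.2
              rw [List.take_take, min_eq_left (by omega)] at h2
              exact h2.trans hpart'
            · intro hii k hk hs
              have hkj1 : k ≤ j+1 := key k hk hs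
              rcases Nat.eq_or_lt_of_le hkj1 with he | hlt
              · right; right; rw [he]; exact helif.2
              · rcases Nat.lt_or_ge (pvMaxB (p.take (j+1))) k with hgt | hle
                · exfalso
                  have hbk : pvBrd (p.take (j+1)) k := by
                    refine ⟨by rw [hlen_tj]; omega, ?_⟩
                    rw [List.take_take, min_eq_left (by omega)]
                    exact List.suffix_of_suffix_length_le hs hpart'
                      (by rw [List.length_take, List.length_take]; omega)
                  have := pvBrd_le_maxB hbk
                  omega
                · left; exact hle
            · exact hms'
            · omega
          · simp only [pvKmpLoop, if_pos hi, if_pos hc, if_neg hjm1, if_neg helif]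
            apply ih
            · omega
            · exact hjm2
            · exact hpart'
            · intro hii k hk hs
              left; exact key k hk hs
            · exact hms'
            · omega
      · -- mismatch at current position
        have helif : i < t.length ∧ p.getD j ' ' ≠ t.getD i ' ' := ⟨hi, hc⟩
        by_cases hj0 : j ≠ 0
        · simp only [pvKmpLoop, if_pos hi, if_neg hc, if_neg (by omega : ¬ j = p.length),
            if_pos helif, if_pos hj0]
          have hval : lps.getD (j-1) 0 = pvMaxB (p.take j) := by
            have h := hl (j-1) (by omega)
            rwa [Nat.sub_add_cancel (by omega)] at h
          rw [hval]
          have hlenj : (p.take j).length = j := by rw [List.length_take]; omega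
          have hne : p.take j ≠ [] := by
            have h := take_ne_nil_of_lt (i := j-1) (by omega : j-1 < p.length)
            rwa [Nat.sub_add_cancel (by omega)] at h
          have hmb := pvMaxB_brd hne
          have hjv : pvMaxB (p.take j) < j := by
            have := pvMaxB_lt hne; rwa [hlenj] at this
          apply ih
          · exact hin
          · omega
          · have h2 := hmb.2
            rw [List.take_take, min_eq_left (by omega)] at h2
            exact h2.trans hpart
          · intro hii k hk hs
            rcases hg2 hi k hk hs with h | h | h
            · rcases Nat.eq_or_lt_of_le h with he | hlt
              · right; right; rw [he]; exact hc
              · rcases Nat.lt_or_ge (pvMaxB (p.take j)) k with hgt | hle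
                · exfalso
                  have hbk : pvBrd (p.take j) k := by
                    refine ⟨by rw [hlenj]; omega, ?_⟩
                    rw [List.take_take, min_eq_left (by omega)]
                    exact List.suffix_of_suffix_length_le hs hpart
                      (by rw [List.length_take, List.length_take]; omega)
                  have := pvBrd_le_maxB hbk
                  omega
                · left; exact hle
            · right; left; exact h
            · right; right; exact h
          · exact hms
          · omega
        · simp only [pvKmpLoop, if_pos hi, if_neg hc, if_neg (by omega : ¬ j = p.length),
            if_pos helif, if_neg hj0]
          rw [not_not] at hj0
          subst hj0
          have hsnoc : p = p.take (p.length-1) ++ [p.getD (p.length-1) ' '] := by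
            have h := take_snoc (p := p) (i := p.length - 1) (by
              have := List.length_pos_of_ne_nil hp; omega)
            rw [Nat.sub_add_cancel (by have := List.length_pos_of_ne_nil hp; omega),
              List.take_length] at h
            exact h
          have hnm : ¬ (p.length ≤ i+1 ∧ pvMatchAt t p (i+1-p.length) = true) := by
            rintro ⟨hm1, hM⟩
            have hfull := (match_iff_suffix' (by omega) hm1).mp hM
            rw [hsnoc, take_snoc hi, suffix_snoc_iff] at hfull
            rcases hg2 hi (p.length-1) (by omega) hfull.1 with h | h | h
            · have hm0 := List.length_pos_of_ne_nil hp
              have he : p.length - 1 = 0 := by omega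
              have hs2 := hfull.2
              rw [he] at hs2
              exact hc hs2
            · have hm0 := List.length_pos_of_ne_nil hp
              omega
            · exact h hfull.2
          have hms' : ms = pvOccUpTo t p (i+1) := by
            rw [occUpTo_succ_eq' hnm]; exact hms
          apply ih
          · omega
          · exact hjm
          · simp only [List.take_zero]; exact List.nil_suffix
          · intro hii k hk hs
            rcases k with _ | c
            · left; omega
            · have hcm : c < p.length := by omega
              rw [take_snoc hcm, take_snoc hi, suffix_snoc_iff] at hs
              rcases hg2 hi c (by omega) hs.1 with h | h | h
              · have hc0 : c = 0 := by omega
                rw [hc0] at hs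
                exact absurd hs.2 hc
              · omega
              · exact absurd hs.2 h
          · exact hms'
          · omega
    · -- loop exit: i = t.length
      have hieq : i = t.length := by omega
      simp only [pvKmpLoop, if_neg hi]
      rw [hms, hieq]
      exact occUpTo_final' hp

theorem pvKmpSearch_eq' (t p : List Char) (hp : p ≠ []) : pvKmpSearch t p = pvOcc t p := by
  unfold pvKmpSearch
  rw [if_neg hp, pvLps_eq' p hp]
  apply pvKmpLoop_go' t p hp (pvLpsTab p)
  · intro k hk
    unfold pvLpsTab
    rw [List.getD_eq_getElem _ _ (by simpa using hk), List.getElem_map, List.getElem_range]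
  · exact Nat.zero_le _
  · exact List.length_pos_of_ne_nil hp
  · simp only [List.take_zero]; exact List.nil_suffix
  · intro hi k hk hs
    left
    rw [List.take_zero, List.suffix_nil] at hs
    have h0 := congrArg List.length hs
    rw [List.length_take, List.length_nil] at h0
    have hm := List.length_pos_of_ne_nil hp
    omega
  · rw [occUpTo_zero' hp]
  · omega

theorem word_contrib' (t : List Char) (w : String) :
    (pvKmpSearch t w.toList).map (fun (s : Nat) => ([(s : Int), (s : Int) + PySem.Str.len w - 1] : List Int))
      = (List.range t.length).filterMap (fun i => pvG t i w) := by
  by_cases hw : w.toList = []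
  · rw [hw]
    have h1 : pvKmpSearch t [] = [] := rfl
    rw [h1]
    have h2 : ∀ i, pvG t i w = none := by
      intro i; unfold pvG; rw [if_neg (by simp [hw])]
    simp [h2]
  · rw [pvKmpSearch_eq' t _ hw]
    unfold pvOcc
    rw [map_filter_eq_filterMap]
    apply List.filterMap_congr
    intro i _
    rw [PySem.Str.len_eq]
    unfold pvMatchAt pvG
    by_cases h : (t.drop i).take w.toList.length = w.toList
    · rw [if_pos (by simpa using h), if_pos ⟨hw, h⟩]
    · rw [if_neg (by simpa using h), if_neg (by tauto)]

theorem A_eq' (text : String) (words : List String) :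
    indexPairs4 text words
      = PySem.List.sorted (words.flatMap (fun w =>
          (List.range text.toList.length).filterMap (fun i => pvG text.toList i w))) (fun x => x) false := by
  unfold indexPairs4
  have h1 : ∀ (w : String) (acc : List (List Int)),
      (pvKmpSearch text.toList w.toList).foldl
        (fun acc2 (s : Nat) => acc2 ++ [[(s : Int), (s : Int) + PySem.Str.len w - 1]]) acc
      = acc ++ (List.range text.toList.length).filterMap (fun i => pvG text.toList i w) := by
    intro w acc
    rw [PySem.List.foldl_append_singleton_eq_map, word_contrib']
  simp only [h1]
  rw [PySem.List.foldl_append_eq_flatMap, List.nil_append]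

theorem slice_toList_eq (text w : String) (k : Nat) :
    (PySem.Str.slice text (some (k:Int)) (some ((k:Int) + PySem.Str.len w))).toList
      = (text.toList.drop k).take w.toList.length := by
  rw [PySem.Str.len_eq, PySem.Str.toList_slice, PySem.Chars.slice_eq_listSlice,
    PySem.List.slice_natCast_add]

theorem B_eq' (text : String) (words : List String) : indexPairs4_alt text words = pvB text words := by
  simp only [indexPairs4_alt, pvB]
  rw [PySem.Str.len_eq, PySem.List.pyRange_zero_natCast, List.flatMap_map]
  apply List.flatMap_congr
  intro k _
  rw [map_filter_eq_filterMap]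
  apply List.filterMap_congr
  intro w _
  have hcond : ((w ≠ "" && (PySem.Str.slice text (some (k:Int)) (some ((k:Int) + (w.toList.length : Int))) == w)) = true)
      ↔ (w.toList ≠ [] ∧ (text.toList.drop k).take w.toList.length = w.toList) := by
    rw [← PySem.Str.len_eq w, Bool.and_eq_true, decide_eq_true_iff, beq_iff_eq]
    constructor
    · rintro ⟨h1, h2⟩
      refine ⟨fun hnil => h1 (String.toList_eq_nil_iff.mp hnil), ?_⟩
      rw [← slice_toList_eq text w k, h2]
    · rintro ⟨h1, h2⟩
      refine ⟨fun hmt => h1 (by rw [hmt]; rfl), ?_⟩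
      rw [← String.toList_inj, slice_toList_eq text w k, h2]
  unfold pvG
  rw [PySem.Str.len_eq]
  simp only [PySem.Str.len_eq] at *
  by_cases h : w.toList ≠ [] ∧ (text.toList.drop k).take w.toList.length = w.toList
  · rw [if_pos (hcond.mpr h), if_pos h]
  · rw [if_neg (fun hh => h (hcond.mp hh)), if_neg h]

theorem pvB_perm' (text : String) (words : List String) :
    (pvB text words).Perm (words.flatMap (fun w =>
      (List.range text.toList.length).filterMap (fun i => pvG text.toList i w))) := by
  unfold pvB
  refine List.Perm.trans
    (swap_perm (PySem.List.sorted words (fun w => PySem.Str.len w) false)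
      (List.range text.toList.length) (fun w i => pvG text.toList i w)).symm ?_
  exact List.Perm.flatMap (PySem.List.sorted_perm words (fun w => PySem.Str.len w) false)
    (fun a _ => List.Perm.refl _)

theorem pvG_shape {t : List Char} {i : Nat} {w : String} {x : List Int}
    (h : pvG t i w = some x) :
    ∃ L : Nat, 1 ≤ L ∧ x = [(i : Int), (i : Int) + (L : Int) - 1] ∧ L = w.toList.length := by
  unfold pvG at h
  by_cases hc : w.toList ≠ [] ∧ (t.drop i).take w.toList.length = w.toList
  · rw [if_pos hc] at h
    refine ⟨w.toList.length, ?_, (Option.some_inj.mp h).symm, rfl⟩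
    have := List.length_pos_of_ne_nil hc.1
    omega
  · rw [if_neg hc] at h
    exact absurd h (by simp)

theorem pvB_pairwise' (text : String) (words : List String) :
    (pvB text words).Pairwise (· ≤ ·) := by
  unfold pvB
  apply pairwise_flatMap_of
  · intro k _
    rw [List.pairwise_filterMap]
    refine (PySem.List.sorted_pairwise words (fun w => PySem.Str.len w)).imp ?_
    intro w w' hle b hb b' hb'
    obtain ⟨L, hL1, hbe, hLw⟩ := pvG_shape hb
    obtain ⟨L', hL1', hbe', hLw'⟩ := pvG_shape hb'
    rw [hbe, hbe']
    apply pair_le_pair_right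
    rw [PySem.Str.len_eq, PySem.Str.len_eq, ← hLw, ← hLw'] at hle
    omega
  · refine List.pairwise_lt_range.imp ?_
    intro a b hab x hx y hy
    rw [List.mem_filterMap] at hx hy
    obtain ⟨w, _, hwx⟩ := hx
    obtain ⟨w', _, hwy⟩ := hy
    obtain ⟨L, _, hbe, _⟩ := pvG_shape hwx
    obtain ⟨L', _, hbe', _⟩ := pvG_shape hwy
    rw [hbe, hbe']
    apply pair_le_pair_left
    exact_mod_cast hab

theorem sorted_bridge' (xs : List (List Int)) :
    @PySem.List.sorted (List Int) (List Int) List.instLT (fun a b => List.decidableLT a b) xs (fun x => x) false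
      = @PySem.List.sorted (List Int) (List Int) List.instLinearOrder.toLT LinearOrder.toDecidableLT xs (fun x => x) false := by
  rw [@PySem.List.sorted_eq_foldl_insertBy (List Int) (List Int) List.instLT (fun a b => List.decidableLT a b) xs (fun x => x),
      @PySem.List.sorted_eq_foldl_insertBy (List Int) (List Int) List.instLinearOrder.toLT LinearOrder.toDecidableLT xs (fun x => x)]
  congr 1
  funext acc x
  congr 1
  funext a b
  apply decide_eq_decide.mpr
  constructor
  · intro h; exact (List.lt_iff_lex_lt a b).mp h
  · intro h; exact (List.lt_iff_lex_lt a b).mpr h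

-- ===== VERDICT (by name: the statement is the Claim_ definition above) =====
theorem indexPairs4_spec : Claim_equal_indexPairs4 := by
  intro text words _
  unfold Spec_indexPairs4
  rw [B_eq', A_eq', sorted_bridge']
  exact PySem.List.sorted_id_eq_of_perm_of_pairwise _ _ (pvB_perm' text words) (pvB_pairwise' text words)
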